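-- pv_equiv track=rewrite | github.com/ernestogbusta/ernierank | analyze_url.py | filter_and_weight_keywords
-- ===== SOURCE A (Python) =====
-- from typing import List, Dict
--
-- def filter_and_weight_keywords(keywords: List[str]) -> List[str]:
--     """
--     Filters keywords by their length and applies weighting logic to prefer keywords
--     of 2-3 words over 4-6 words.
--     """
--     weighted_keywords = {}
--     for keyword in keywords:
--         words = keyword.split()
--         length = len(words)
--         if length in (2, 3):
--             weight = 5
--         elif length == 4:
--             weight = 4
--         elif length in (5, 6):
--             weight = 3
--         else:
--             continue  # Skip any keywords outside the 2-6 word range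
--
--         weighted_keywords[keyword] = weight
--
--     # Sort keywords by weight and then alphabetically within the same weight
--     sorted_keywords = sorted(weighted_keywords.items(), key=lambda x: (-x[1], x[0]))
--     return [kw for kw, weight in sorted_keywords]
-- ===== SOURCE B (Python) =====
-- from typing import List
--
-- def filter_and_weight_keywords(keywords: List[str]) -> List[str]:
--     # Single pass partitioning into three weight buckets (dedup via a seen-set),
--     # then each bucket sorted alphabetically and concatenated in weight order.
--     seen = set()
--     top, mid, low = [], [], []  # weights 5, 4, 3
--     for kw in keywords:
--         if kw in seen:
--             continue
--         n = len(kw.split())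
--         if 2 <= n <= 3:
--             seen.add(kw)
--             top.append(kw)
--         elif n == 4:
--             seen.add(kw)
--             mid.append(kw)
--         elif 5 <= n <= 6:
--             seen.add(kw)
--             low.append(kw)
--     return sorted(top) + sorted(mid) + sorted(low)
-- ===== Notes on version B (the rewrite author's own statement) =====
-- stated objective: alternative
-- what changed: Replaces the dict-of-weights plus one global sort by tuple key (-weight, kw) with a single-pass partition into three weight buckets (dedup via a seen-set), each bucket sorted alphabetically and concatenated in weight order.
import Mathlib
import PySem

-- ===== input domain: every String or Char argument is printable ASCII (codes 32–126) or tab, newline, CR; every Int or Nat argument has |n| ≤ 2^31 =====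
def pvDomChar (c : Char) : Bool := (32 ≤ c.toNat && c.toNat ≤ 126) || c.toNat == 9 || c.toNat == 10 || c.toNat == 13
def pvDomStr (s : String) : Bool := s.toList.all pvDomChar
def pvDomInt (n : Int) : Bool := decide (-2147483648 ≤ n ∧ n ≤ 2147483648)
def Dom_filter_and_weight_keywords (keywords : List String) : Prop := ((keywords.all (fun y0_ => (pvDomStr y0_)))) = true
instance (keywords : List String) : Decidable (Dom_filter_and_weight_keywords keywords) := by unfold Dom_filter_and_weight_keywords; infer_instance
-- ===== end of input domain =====

-- ===== PORT A =====
-- B replaces A's dict + one global sort by key (-weight, kw) with a single-pass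
-- partition into three weight buckets, each sorted alphabetically and concatenated.
def filter_and_weight_keywords (keywords : List String) : List String :=
  let weighted_keywords : PySem.Dict String Int :=
    keywords.foldl (fun d keyword =>
      let words := PySem.Str.split₀ keyword
      let length : Int := words.length
      if length = 2 ∨ length = 3 then d.insert keyword 5
      else if length = 4 then d.insert keyword 4
      else if length = 5 ∨ length = 6 then d.insert keyword 3
      else d) PySem.Dict.empty
  let sorted_keywords := PySem.List.sorted2 weighted_keywords.items (fun x => -x.2) (fun x => x.1)
  sorted_keywords.map (fun p => p.1)

-- ===== PORT B =====
def filter_and_weight_keywords_alt (keywords : List String) : List String :=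
  let st :=
    keywords.foldl (fun (st : PySem.Set String × List String × List String × List String) kw =>
      if PySem.Set.contains st.1 kw then st
      else
        let n := (PySem.Str.split₀ kw).length
        if 2 ≤ n ∧ n ≤ 3 then (PySem.Set.add st.1 kw, st.2.1 ++ [kw], st.2.2.1, st.2.2.2)
        else if n = 4 then (PySem.Set.add st.1 kw, st.2.1, st.2.2.1 ++ [kw], st.2.2.2)
        else if 5 ≤ n ∧ n ≤ 6 then (PySem.Set.add st.1 kw, st.2.1, st.2.2.1, st.2.2.2 ++ [kw])
        else st) (PySem.Set.empty, [], [], [])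
  PySem.List.sorted st.2.1 (fun x => x) ++ PySem.List.sorted st.2.2.1 (fun x => x)
    ++ PySem.List.sorted st.2.2.2 (fun x => x)

-- ===== PRECONDITION & SPEC =====
def Spec_filter_and_weight_keywords (keywords : List String) (out : List String) : Prop := out = filter_and_weight_keywords_alt keywords
instance (keywords : List String) (out : List String) : Decidable (Spec_filter_and_weight_keywords keywords out) := by unfold Spec_filter_and_weight_keywords; infer_instance

-- ===== CLAIM (what is proved, stated in full; the proofs are below) =====
def Claim_equal_filter_and_weight_keywords : Prop := ∀ (keywords : List String), Dom_filter_and_weight_keywords keywords → Spec_filter_and_weight_keywords keywords (filter_and_weight_keywords keywords)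

-- ===== LEMMAS AND PROOFS =====
def pvStepA (d : PySem.Dict String Int) (keyword : String) : PySem.Dict String Int :=
  let words := PySem.Str.split₀ keyword
  let length : Int := words.length
  if length = 2 ∨ length = 3 then d.insert keyword 5
  else if length = 4 then d.insert keyword 4
  else if length = 5 ∨ length = 6 then d.insert keyword 3
  else d

def pvStepB (st : PySem.Set String × List String × List String × List String) (kw : String) :
    PySem.Set String × List String × List String × List String :=
  if PySem.Set.contains st.1 kw then st
  else
    let n := (PySem.Str.split₀ kw).length
    if 2 ≤ n ∧ n ≤ 3 then (PySem.Set.add st.1 kw, st.2.1 ++ [kw], st.2.2.1, st.2.2.2)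
    else if n = 4 then (PySem.Set.add st.1 kw, st.2.1, st.2.2.1 ++ [kw], st.2.2.2)
    else if 5 ≤ n ∧ n ≤ 6 then (PySem.Set.add st.1 kw, st.2.1, st.2.2.1, st.2.2.2 ++ [kw])
    else st

-- the weight both loops assign to a keyword (none = skipped)
def pvWeight (kw : String) : Option Int :=
  let n := (PySem.Str.split₀ kw).length
  if 2 ≤ n ∧ n ≤ 3 then some 5
  else if n = 4 then some 4
  else if 5 ≤ n ∧ n ≤ 6 then some 3
  else none

def pvRel (d : PySem.Dict String Int)
    (st : PySem.Set String × List String × List String × List String) : Prop :=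
  st.1 = d.keys ∧ d.keys.Nodup ∧ (∀ p ∈ d.items, pvWeight p.1 = some p.2) ∧
  st.2.1 = (d.items.filter (fun p => p.2 == 5)).map (fun p => p.1) ∧
  st.2.2.1 = (d.items.filter (fun p => p.2 == 4)).map (fun p => p.1) ∧
  st.2.2.2 = (d.items.filter (fun p => p.2 == 3)).map (fun p => p.1)

theorem pvPortA_eq (ks : List String) :
    filter_and_weight_keywords ks =
      (PySem.List.sorted2 (ks.foldl pvStepA PySem.Dict.empty).items
        (fun x => -x.2) (fun x => x.1)).map (fun p => p.1) := rfl

theorem pvPortB_eq (ks : List String) :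
    filter_and_weight_keywords_alt ks =
      PySem.List.sorted (ks.foldl pvStepB (PySem.Set.empty, [], [], [])).2.1 (fun x => x)
      ++ PySem.List.sorted (ks.foldl pvStepB (PySem.Set.empty, [], [], [])).2.2.1 (fun x => x)
      ++ PySem.List.sorted (ks.foldl pvStepB (PySem.Set.empty, [], [], [])).2.2.2 (fun x => x) := rfl

theorem pvStepA_eq (d : PySem.Dict String Int) (kw : String) :
    pvStepA d kw = match pvWeight kw with
      | some w => d.insert kw w
      | none => d := by
  simp only [pvStepA, pvWeight]
  split_ifs <;> first | rfl | (exfalso; omega)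

theorem pvInsert_same (d : PySem.Dict String Int) (kw : String) (v : Int)
    (hnd : d.keys.Nodup) (hg : d.get? kw = some v) : d.insert kw v = d := by
  have hc : d.contains kw = true := by
    rw [PySem.Dict.contains_eq_isSome_get?, hg]; rfl
  apply PySem.Dict.ext
  rw [PySem.Dict.items_insert_of_contains d v hc]
  refine (List.map_congr_left ?_).trans (List.map_id _)
  intro p hp
  by_cases hpk : (p.1 == kw) = true
  · have h1 : p.1 = kw := by simpa using hpk
    have h2 := PySem.Dict.get?_of_mem_items d (k := p.1) (v := p.2)
      (by simpa using hp) hnd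
    rw [h1, hg] at h2
    have h3 : v = p.2 := by injection h2
    simp only [hpk, if_true, id]
    rw [h3, ← h1]
  · simp [hpk]

theorem pvStep_rel (d : PySem.Dict String Int)
    (st : PySem.Set String × List String × List String × List String) (kw : String)
    (h : pvRel d st) : pvRel (pvStepA d kw) (pvStepB st kw) := by
  obtain ⟨hs, hnd, hw, h5, h4, h3⟩ := h
  rw [pvStepA_eq]
  by_cases hc : d.contains kw = true
  · have hmem : kw ∈ d.keys := (PySem.Dict.contains_iff_mem_keys d kw).mp hc
    have hsc : PySem.Set.contains st.1 kw = true := by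
      rw [hs]
      simp only [PySem.Set.contains, List.contains_iff_mem]
      exact hmem
    have hstep : pvStepB st kw = st := by
      simp only [pvStepB, hsc, if_true]
    rw [hstep]
    have hex : ∃ v, (kw, v) ∈ d.items := by
      have hkm : kw ∈ d.items.map (fun p => p.1) := by
        simpa [PySem.Dict.keys] using hmem
      obtain ⟨p, hp, hpk⟩ := List.mem_map.mp hkm
      exact ⟨p.2, by rwa [show (kw, p.2) = p from by rw [← hpk]]⟩
    obtain ⟨v, hv⟩ := hex
    have hg : d.get? kw = some v := PySem.Dict.get?_of_mem_items d hv hnd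
    have hwv : pvWeight kw = some v := hw (kw, v) hv
    rw [hwv]
    show pvRel (d.insert kw v) st
    rw [pvInsert_same d kw v hnd hg]
    exact ⟨hs, hnd, hw, h5, h4, h3⟩
  · have hcf : d.contains kw = false := by simpa using hc
    have hnmem : kw ∉ d.keys := fun hm => hc ((PySem.Dict.contains_iff_mem_keys d kw).mpr hm)
    have hsc : PySem.Set.contains st.1 kw = false := by
      rw [hs]
      simp only [PySem.Set.contains]
      simpa using hnmem
    have hadd : PySem.Set.add st.1 kw = st.1 ++ [kw] := by
      simp only [PySem.Set.add, hsc, Bool.false_eq_true, if_false]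
    cases hwv : pvWeight kw with
    | none =>
      show pvRel d (pvStepB st kw)
      have hstep : pvStepB st kw = st := by
        simp only [pvWeight] at hwv
        simp only [pvStepB, hsc, Bool.false_eq_true, if_false]
        split_ifs at hwv ⊢
        rfl
      rw [hstep]
      exact ⟨hs, hnd, hw, h5, h4, h3⟩
    | some w =>
      show pvRel (d.insert kw w) (pvStepB st kw)
      simp only [pvWeight] at hwv
      have hitems := PySem.Dict.items_insert_of_not_contains d w hcf
      have hkeys := PySem.Dict.keys_insert_of_not_contains d w hcf
      have hnd' := PySem.Dict.nodup_keys_insert d kw w hnd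
      have hw' : ∀ p ∈ (PySem.Dict.insert d kw w).items, pvWeight p.1 = some p.2 := by
        rw [hitems]
        intro p hp
        rcases List.mem_append.mp hp with hp | hp
        · exact hw p hp
        · have hpe : p = (kw, w) := by simpa using hp
          subst hpe
          simp only [pvWeight]
          split_ifs at hwv ⊢ <;> rw [hwv]
      split_ifs at hwv with hc1 hc2 hc3
      · have hw5 : w = 5 := by injection hwv.symm
        have hstep : pvStepB st kw = (PySem.Set.add st.1 kw, st.2.1 ++ [kw], st.2.2.1, st.2.2.2) := by
          simp only [pvStepB, hsc, Bool.false_eq_true, if_false]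
          split_ifs
          rfl
        rw [hstep]
        subst hw5
        refine ⟨by rw [hadd, hs, hkeys], hnd', hw', ?_, ?_, ?_⟩ <;>
          simp [hitems, List.filter_append, h5, h4, h3]
      · have hw4 : w = 4 := by injection hwv.symm
        have hstep : pvStepB st kw = (PySem.Set.add st.1 kw, st.2.1, st.2.2.1 ++ [kw], st.2.2.2) := by
          simp only [pvStepB, hsc, Bool.false_eq_true, if_false]
          split_ifs
          rfl
        rw [hstep]
        subst hw4
        refine ⟨by rw [hadd, hs, hkeys], hnd', hw', ?_, ?_, ?_⟩ <;>
          simp [hitems, List.filter_append, h5, h4, h3]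
      · have hw3 : w = 3 := by injection hwv.symm
        have hstep : pvStepB st kw = (PySem.Set.add st.1 kw, st.2.1, st.2.2.1, st.2.2.2 ++ [kw]) := by
          simp only [pvStepB, hsc, Bool.false_eq_true, if_false]
          split_ifs
          rfl
        rw [hstep]
        subst hw3
        refine ⟨by rw [hadd, hs, hkeys], hnd', hw', ?_, ?_, ?_⟩ <;>
          simp [hitems, List.filter_append, h5, h4, h3]

theorem pvFold_rel (ks : List String) (d : PySem.Dict String Int)
    (st : PySem.Set String × List String × List String × List String)
    (h : pvRel d st) : pvRel (ks.foldl pvStepA d) (ks.foldl pvStepB st) := by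
  induction ks generalizing d st with
  | nil => exact h
  | cons k ks ih => exact ih _ _ (pvStep_rel d st k h)

theorem pvSorted2_eq_sorted_lex (xs : List (String × Int)) :
    PySem.List.sorted2 xs (fun x => -x.2) (fun x => x.1) =
      PySem.List.sorted xs (fun x => toLex ((-x.2 : Int), x.1)) := by
  rw [PySem.List.sorted_eq_foldl_insertBy]
  simp only [PySem.List.sorted2]
  congr 1
  funext acc x
  congr 1
  funext a b
  rcases lt_trichotomy (-a.2 : Int) (-b.2 : Int) with h | h | h
  · simp [h, Prod.Lex.lt_iff, not_lt_of_gt h]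
  · simp [h, Prod.Lex.lt_iff]
  · have h1 : ¬(-a.2 < -b.2 : Prop) := not_lt_of_gt h
    have h2 : (-a.2 : Int) ≠ -b.2 := ne_of_gt h
    simp [h, h1, h2, Prod.Lex.lt_iff]

theorem pvBucket_nodup (d : PySem.Dict String Int) (hnd : d.keys.Nodup) (c : Int) :
    ((d.items.filter (fun p => p.2 == c)).map (fun p => p.1)).Nodup := by
  have hkeys : d.keys = d.items.map (fun p => p.1) := by simp [PySem.Dict.keys]
  rw [hkeys] at hnd
  exact ((List.filter_sublist (l := d.items) (p := fun p => p.2 == c)).map (fun p => p.1)).nodup hnd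

theorem pvSorted_strict (b : List String) (hnd : b.Nodup) :
    (PySem.List.sorted b (fun x => x)).Pairwise (· < ·) := by
  have h1 : (PySem.List.sorted b (fun x => x)).Pairwise (· ≤ ·) := by
    simpa using PySem.List.sorted_pairwise b (fun x => x)
  have h2 : (PySem.List.sorted b (fun x => x)).Nodup :=
    hnd.perm (PySem.List.sorted_perm b (fun x => x) false).symm
  exact (h1.and h2).imp (fun h => lt_of_le_of_ne h.1 h.2)

theorem pvFinal (d : PySem.Dict String Int)
    (st : PySem.Set String × List String × List String × List String)
    (h : pvRel d st) :
    (PySem.List.sorted2 d.items (fun x => -x.2) (fun x => x.1)).map (fun p => p.1) =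
      PySem.List.sorted st.2.1 (fun x => x) ++ PySem.List.sorted st.2.2.1 (fun x => x)
        ++ PySem.List.sorted st.2.2.2 (fun x => x) := by
  obtain ⟨hs, hnd, hw, h5, h4, h3⟩ := h
  have hvals : ∀ p ∈ d.items, p.2 = 5 ∨ p.2 = 4 ∨ p.2 = 3 := by
    intro p hp
    have := hw p hp
    simp only [pvWeight] at this
    split_ifs at this <;> (injection this with hh; omega)
  have e5 : (st.2.1).map (fun k => (k, (5:Int))) = d.items.filter (fun p => p.2 == 5) := by
    rw [h5, List.map_map]
    refine (List.map_congr_left ?_).trans (List.map_id _)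
    intro p hp
    have hpv : p.2 = 5 := by simpa using (List.mem_filter.mp hp).2
    simp [Function.comp, ← hpv]
  have e4 : (st.2.2.1).map (fun k => (k, (4:Int))) = d.items.filter (fun p => p.2 == 4) := by
    rw [h4, List.map_map]
    refine (List.map_congr_left ?_).trans (List.map_id _)
    intro p hp
    have hpv : p.2 = 4 := by simpa using (List.mem_filter.mp hp).2
    simp [Function.comp, ← hpv]
  have e3 : (st.2.2.2).map (fun k => (k, (3:Int))) = d.items.filter (fun p => p.2 == 3) := by
    rw [h3, List.map_map]
    refine (List.map_congr_left ?_).trans (List.map_id _)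
    intro p hp
    have hpv : p.2 = 3 := by simpa using (List.mem_filter.mp hp).2
    simp [Function.comp, ← hpv]
  have hp5 : ((PySem.List.sorted st.2.1 (fun x => x)).map (fun k => (k, (5:Int)))).Perm
      (d.items.filter (fun p => p.2 == 5)) := by
    rw [← e5]; exact (PySem.List.sorted_perm _ _ _).map _
  have hp4 : ((PySem.List.sorted st.2.2.1 (fun x => x)).map (fun k => (k, (4:Int)))).Perm
      (d.items.filter (fun p => p.2 == 4)) := by
    rw [← e4]; exact (PySem.List.sorted_perm _ _ _).map _
  have hp3 : ((PySem.List.sorted st.2.2.2 (fun x => x)).map (fun k => (k, (3:Int)))).Perm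
      (d.items.filter (fun p => p.2 == 3)) := by
    rw [← e3]; exact (PySem.List.sorted_perm _ _ _).map _
  have hsplit : (d.items.filter (fun p => p.2 == 5) ++ d.items.filter (fun p => p.2 == 4)
      ++ d.items.filter (fun p => p.2 == 3)).Perm d.items := by
    have t1 := List.filter_append_perm (fun p => p.2 == 5) d.items
    have e45 : (d.items.filter (fun p => !(p.2 == 5))).filter (fun p => p.2 == 4)
        = d.items.filter (fun p => p.2 == 4) := by
      rw [List.filter_filter]
      apply List.filter_congr
      intro p hp
      by_cases hh : p.2 = 4 <;> simp [hh]
    have e34 : (d.items.filter (fun p => !(p.2 == 5))).filter (fun p => !(p.2 == 4))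
        = d.items.filter (fun p => p.2 == 3) := by
      rw [List.filter_filter]
      apply List.filter_congr
      intro p hp
      rcases hvals p hp with hh | hh | hh <;> simp [hh]
    have t2 := List.filter_append_perm (fun p => p.2 == 4) (d.items.filter (fun p => !(p.2 == 5)))
    rw [e45, e34] at t2
    rw [List.append_assoc]
    exact ((t2.append_left _).trans t1)
  have hys_perm : (((PySem.List.sorted st.2.1 (fun x => x)).map (fun k => (k, (5:Int))))
      ++ ((PySem.List.sorted st.2.2.1 (fun x => x)).map (fun k => (k, (4:Int))))
      ++ ((PySem.List.sorted st.2.2.2 (fun x => x)).map (fun k => (k, (3:Int))))).Perm d.items :=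
    ((hp5.append hp4).append hp3).trans hsplit
  have hnd5 : st.2.1.Nodup := by rw [h5]; exact pvBucket_nodup d hnd 5
  have hnd4 : st.2.2.1.Nodup := by rw [h4]; exact pvBucket_nodup d hnd 4
  have hnd3 : st.2.2.2.Nodup := by rw [h3]; exact pvBucket_nodup d hnd 3
  have hys_pair : (((PySem.List.sorted st.2.1 (fun x => x)).map (fun k => (k, (5:Int))))
      ++ ((PySem.List.sorted st.2.2.1 (fun x => x)).map (fun k => (k, (4:Int))))
      ++ ((PySem.List.sorted st.2.2.2 (fun x => x)).map (fun k => (k, (3:Int))))).Pairwise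
      (fun a b => toLex ((-a.2 : Int), a.1) < toLex ((-b.2 : Int), b.1)) := by
    rw [List.pairwise_append, List.pairwise_append]
    refine ⟨⟨?_, ?_, ?_⟩, ?_, ?_⟩
    · rw [List.pairwise_map]
      exact (pvSorted_strict _ hnd5).imp (fun hlt => by
        simp [Prod.Lex.lt_iff, hlt])
    · rw [List.pairwise_map]
      exact (pvSorted_strict _ hnd4).imp (fun hlt => by
        simp [Prod.Lex.lt_iff, hlt])
    · intro a ha b hb
      obtain ⟨k, _, rfl⟩ := List.mem_map.mp ha
      obtain ⟨k', _, rfl⟩ := List.mem_map.mp hb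
      simp [Prod.Lex.lt_iff]
    · rw [List.pairwise_map]
      exact (pvSorted_strict _ hnd3).imp (fun hlt => by
        simp [Prod.Lex.lt_iff, hlt])
    · intro a ha b hb
      rcases List.mem_append.mp ha with ha | ha <;>
        [obtain ⟨k, _, rfl⟩ := List.mem_map.mp ha; obtain ⟨k, _, rfl⟩ := List.mem_map.mp ha] <;>
        · obtain ⟨k', _, rfl⟩ := List.mem_map.mp hb
          simp [Prod.Lex.lt_iff]
  rw [pvSorted2_eq_sorted_lex,
    PySem.List.sorted_eq_of_perm_of_pairwise_lt d.items _ _ hys_perm hys_pair]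
  simp [Function.comp_def]

-- ===== VERDICT (by name: the statement is the Claim_ definition above) =====
theorem filter_and_weight_keywords_spec : Claim_equal_filter_and_weight_keywords := by
  intro ks _
  unfold Spec_filter_and_weight_keywords
  rw [pvPortA_eq, pvPortB_eq]
  refine pvFinal _ _ (pvFold_rel ks PySem.Dict.empty (PySem.Set.empty, [], [], []) ?_)
  refine ⟨rfl, ?_, ?_, rfl, rfl, rfl⟩ <;> simp [PySem.Dict.empty, PySem.Dict.keys]
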